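-- pv_equiv track=rewrite | github.com/MLDL-FederatedLearning-project/FederatedLearning | models_fedma.py | record_net_data_stats
-- ===== SOURCE A (Python) =====
-- def record_net_data_stats(y_train, net_dataidx_map):
--     net_cls_counts = {}
--     for net_i, dataidx in net_dataidx_map.items():
--         counting = {}
--         for each in dataidx:
--             if y_train[each] in counting:
--                 x = int(counting[y_train[each]])
--                 counting[y_train[each]] = x + 1
--             else:
--                 counting[y_train[each]] = 1
--         sortedDict = dict(sorted(counting.items(), key=lambda x: x[0]))
--         net_cls_counts[net_i] = sortedDict
--
--     return net_cls_counts
-- ===== SOURCE B (Python) =====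
-- from itertools import groupby
--
--
-- def record_net_data_stats(y_train, net_dataidx_map):
--     net_cls_counts = {}
--     for net_i, dataidx in net_dataidx_map.items():
--         labels = sorted(y_train[i] for i in dataidx)
--         net_cls_counts[net_i] = {k: len(list(g)) for k, g in groupby(labels)}
--     return net_cls_counts
-- ===== Notes on version B (the rewrite author's own statement) =====
-- stated objective: alternative
-- what changed: replaces A's hash-dict counting with membership tests followed by a key-sort of the count items by sorting the labels first and doing a single itertools.groupby run-length pass, so the counts come out already in key order with no membership test and no post-sort
import Mathlib
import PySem

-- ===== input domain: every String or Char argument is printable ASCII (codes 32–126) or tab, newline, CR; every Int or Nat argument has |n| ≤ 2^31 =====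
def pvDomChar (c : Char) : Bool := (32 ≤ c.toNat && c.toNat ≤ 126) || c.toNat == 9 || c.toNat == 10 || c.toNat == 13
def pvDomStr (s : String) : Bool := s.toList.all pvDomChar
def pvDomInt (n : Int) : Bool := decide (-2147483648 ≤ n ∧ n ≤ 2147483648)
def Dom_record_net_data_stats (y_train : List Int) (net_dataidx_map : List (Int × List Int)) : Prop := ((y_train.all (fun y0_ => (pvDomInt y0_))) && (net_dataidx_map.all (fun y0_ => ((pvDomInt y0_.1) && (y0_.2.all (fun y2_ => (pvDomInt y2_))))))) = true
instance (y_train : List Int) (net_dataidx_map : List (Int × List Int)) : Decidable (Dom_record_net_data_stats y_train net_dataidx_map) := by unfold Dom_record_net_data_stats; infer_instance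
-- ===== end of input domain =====

-- B replaces A's hash-dict counting followed by a key-sort of the count items with
-- sort-the-labels-first and a single groupby run-length pass (objective: alternative).

-- ===== PORT A =====
-- the inner counting loop of A ('counting[y_train[each]]' is guarded by the membership
-- test, so the getD with default 0 is exact there)
def pvCountLoop (y_train : List Int) (dataidx : List Int) : PySem.Dict Int Int :=
  dataidx.foldl (fun c each =>
    let lbl := PySem.List.pyGetD y_train each 0
    if c.contains lbl then c.insert lbl (c.getD lbl 0 + 1) else c.insert lbl 1)
    PySem.Dict.empty

def record_net_data_stats (y_train : List Int) (net_dataidx_map : List (Int × List Int)) : List (Int × List (Int × Int)) :=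
  (net_dataidx_map.foldl (fun acc p =>
      acc.insert p.1
        ((PySem.Dict.ofList
          (PySem.List.sorted (pvCountLoop y_train p.2).items (fun x => x.1) false)).items))
    PySem.Dict.empty).items

-- ===== PORT B =====
-- itertools.groupby of a list followed by 'len(list(g))' per group: one run-length pass;
-- the dict comprehension inserts the (distinct, ascending) group keys in order, so the
-- resulting dict's items are exactly this list.
def pvRle : List Int → List (Int × Int)
  | [] => []
  | x :: xs =>
      (x, ((xs.takeWhile (· == x)).length : Int) + 1) :: pvRle (xs.dropWhile (· == x))
termination_by t => t.length
decreasing_by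
  simpa [Nat.lt_succ_iff] using List.length_dropWhile_le (· == x) xs

def record_net_data_stats_alt (y_train : List Int) (net_dataidx_map : List (Int × List Int)) : List (Int × List (Int × Int)) :=
  (net_dataidx_map.foldl (fun acc p =>
      acc.insert p.1
        (pvRle (PySem.List.sorted (p.2.map (fun i => PySem.List.pyGetD y_train i 0)) (fun x => x) false)))
    PySem.Dict.empty).items

-- ===== PRECONDITION & SPEC =====
-- Pre_ excludes exactly the inputs where Python A raises IndexError on y_train[each]
-- (B raises there too): every index must be a valid Python index into y_train.
def Pre_record_net_data_stats (y_train : List Int) (net_dataidx_map : List (Int × List Int)) : Prop :=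
  ∀ p ∈ net_dataidx_map, ∀ i ∈ p.2, PySem.Raise.InRange y_train.length i
instance (y_train : List Int) (net_dataidx_map : List (Int × List Int)) : Decidable (Pre_record_net_data_stats y_train net_dataidx_map) := by unfold Pre_record_net_data_stats; infer_instance

def pvWitness_record_net_data_stats : List Int × (List (Int × List Int)) :=
  ([0, 1, 0], [(0, [0, 2, 1]), (1, [-1]), (2, [])])

def Spec_record_net_data_stats (y_train : List Int) (net_dataidx_map : List (Int × List Int)) (out : List (Int × List (Int × Int))) : Prop := out = record_net_data_stats_alt y_train net_dataidx_map
instance (y_train : List Int) (net_dataidx_map : List (Int × List Int)) (out : List (Int × List (Int × Int))) : Decidable (Spec_record_net_data_stats y_train net_dataidx_map out) := by unfold Spec_record_net_data_stats; infer_instance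

-- ===== CLAIM (what is proved, stated in full; the proofs are below) =====
def Claim_equal_record_net_data_stats : Prop := ∀ (y_train : List Int) (net_dataidx_map : List (Int × List Int)), Dom_record_net_data_stats y_train net_dataidx_map → Pre_record_net_data_stats y_train net_dataidx_map → Spec_record_net_data_stats y_train net_dataidx_map (record_net_data_stats y_train net_dataidx_map)

-- ===== LEMMAS AND PROOFS =====

-- adding a fresh head to the accumulator of the Set.ofList fold commutes with the fold
theorem pv_cons_foldl_add (l : List Int) (acc : List Int) (x : Int) (hx : x ∉ l) :
    List.foldl PySem.Set.add (x :: acc) l = x :: List.foldl PySem.Set.add acc l := by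
  induction l generalizing acc with
  | nil => rfl
  | cons y l ih =>
    simp only [List.foldl_cons]
    have hyx : y ≠ x := fun h => hx (h ▸ List.mem_cons_self)
    have h1 : PySem.Set.add (x :: acc) y = x :: PySem.Set.add acc y := by
      simp [PySem.Set.add, PySem.Set.contains, hyx]
      split <;> simp
    rw [h1]
    exact ih _ (fun h => hx (List.mem_cons_of_mem _ h))

-- folding Set.add over copies of an element already present changes nothing
theorem pv_foldl_add_dup (l : List Int) (s : List Int) (x : Int)
    (hl : ∀ y ∈ l, y = x) (hxs : x ∈ s) :
    List.foldl PySem.Set.add s l = s := by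
  induction l with
  | nil => rfl
  | cons y l ih =>
    have hy : y = x := hl y List.mem_cons_self
    subst hy
    have : PySem.Set.add s y = s := by
      simp [PySem.Set.add, PySem.Set.contains, hxs]
    rw [List.foldl_cons, this]
    exact ih (fun z hz => hl z (List.mem_cons_of_mem _ hz))

-- elements dropped past the leading run of x in a sorted list are strictly greater than x
theorem pv_dropWhile_gt (x : Int) (xs : List Int) (hs : xs.Pairwise (· ≤ ·))
    (hge : ∀ y ∈ xs, x ≤ y) : ∀ y ∈ xs.dropWhile (· == x), x < y := by
  induction xs with
  | nil => intro y h; simp [List.dropWhile] at h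
  | cons a as ih =>
    intro y hy
    by_cases hax : a = x
    · subst hax
      rw [List.dropWhile_cons_of_pos (by simp)] at hy
      exact ih ((List.pairwise_cons.mp hs).2)
        (fun z hz => hge z (List.mem_cons_of_mem _ hz)) y hy
    · rw [List.dropWhile_cons_of_neg (by simpa using hax)] at hy
      have hxa : x < a := lt_of_le_of_ne (hge a List.mem_cons_self) (Ne.symm hax)
      rcases List.mem_cons.mp hy with rfl | hy
      · exact hxa
      · exact lt_of_lt_of_le hxa ((List.pairwise_cons.mp hs).1 y hy)

-- the run-length pass over a sorted list produces (key, multiplicity) over the distinct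
-- keys in ascending order, and those keys are strictly increasing
theorem pv_rle_sorted (t : List Int) (hs : t.Pairwise (· ≤ ·)) :
    pvRle t = (PySem.Set.ofList t).map (fun k => (k, (t.count k : Int))) ∧
    (PySem.Set.ofList t).Pairwise (· < ·) := by
  induction t using pvRle.induct with
  | case1 => constructor <;> simp [pvRle, PySem.Set.ofList, PySem.Set.empty]
  | case2 x xs ih =>
    have hxs : xs.takeWhile (· == x) ++ xs.dropWhile (· == x) = xs :=
      List.takeWhile_append_dropWhile
    have hsxs : xs.Pairwise (· ≤ ·) := (List.pairwise_cons.mp hs).2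
    have hge : ∀ y ∈ xs, x ≤ y := (List.pairwise_cons.mp hs).1
    have hrep_eq : ∀ y ∈ xs.takeWhile (· == x), y = x := fun y hy => by
      have := List.mem_takeWhile_imp hy; simpa using this
    have hgt : ∀ y ∈ xs.dropWhile (· == x), x < y := pv_dropWhile_gt x xs hsxs hge
    have hxrest : x ∉ xs.dropWhile (· == x) := fun h => lt_irrefl x (hgt x h)
    have hsrest : (xs.dropWhile (· == x)).Pairwise (· ≤ ·) :=
      List.Pairwise.sublist (List.dropWhile_sublist _) hsxs
    obtain ⟨ih1, ih2⟩ := ih hsrest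
    have hset : PySem.Set.ofList (x :: xs) = x :: PySem.Set.ofList (xs.dropWhile (· == x)) := by
      rw [PySem.Set.ofList_eq_foldl]
      have h0 : List.foldl PySem.Set.add ([] : List Int) (x :: xs)
          = List.foldl PySem.Set.add [x] xs := by
        simp [PySem.Set.add, PySem.Set.contains]
      rw [h0, ← hxs, List.foldl_append,
        pv_foldl_add_dup _ [x] x hrep_eq List.mem_cons_self,
        pv_cons_foldl_add _ [] x hxrest, ← PySem.Set.ofList_eq_foldl, hxs]
    have hcxs : List.count x xs = (xs.takeWhile (· == x)).length := by
      rw [← hxs, List.count_append, List.count_eq_zero.mpr hxrest,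
        List.count_eq_length.mpr (fun b hb => (hrep_eq b hb).symm), Nat.add_zero]
      rw [hxs]
    have hcx : (x :: xs).count x = (xs.takeWhile (· == x)).length + 1 := by
      rw [List.count_cons_self, hcxs]
    have hck : ∀ k ∈ PySem.Set.ofList (xs.dropWhile (· == x)),
        (x :: xs).count k = (xs.dropWhile (· == x)).count k := by
      intro k hk
      have hkmem : k ∈ xs.dropWhile (· == x) := (PySem.Set.mem_ofList _ _).mp hk
      have hkx : x ≠ k := ne_of_lt (hgt k hkmem)
      have hkrep : k ∉ xs.takeWhile (· == x) := fun h => hkx (hrep_eq k h).symm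
      have hxs2 : List.count k xs = List.count k (xs.dropWhile (· == x)) := by
        rw [← hxs, List.count_append, List.count_eq_zero.mpr hkrep, Nat.zero_add]
        rw [hxs]
      rw [List.count_cons_of_ne hkx, hxs2]
    constructor
    · rw [pvRle, hset, List.map_cons, ih1]
      refine congrArg₂ _ ?_ (List.map_congr_left fun k hk => by rw [hck k hk])
      rw [hcx]; push_cast; ring_nf
    · rw [hset]
      exact List.pairwise_cons.mpr
        ⟨fun y hy => hgt y ((PySem.Set.mem_ofList _ _).mp hy), ih2⟩

-- per-partition: A's count-then-sort dict equals B's sort-then-group list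
theorem pv_inner_eq (y : List Int) (d : List Int) :
    (PySem.Dict.ofList
      (PySem.List.sorted (pvCountLoop y d).items (fun x => x.1) false)).items
    = pvRle (PySem.List.sorted (d.map (fun i => PySem.List.pyGetD y i 0)) (fun x => x) false) := by
  set labels := d.map (fun i => PySem.List.pyGetD y i 0) with hl
  set t := PySem.List.sorted labels (fun x => x) false with ht
  have hperm_t : t.Perm labels := PySem.List.sorted_perm labels (fun x => x) false
  have hst : t.Pairwise (· ≤ ·) := PySem.List.sorted_pairwise labels (fun x => x)
  obtain ⟨h1, h2⟩ := pv_rle_sorted t hst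
  have hcount : pvCountLoop y d = PySem.Dict.counter labels := by
    unfold pvCountLoop
    rw [← PySem.Dict.foldl_insert_getD_add_one_eq_counter, hl, List.foldl_map]
    apply PySem.List.foldl_congr_mem
    intro c e _
    by_cases hc : c.contains (PySem.List.pyGetD y e 0) = true
    · simp [hc]
    · simp only [Bool.not_eq_true] at hc
      rw [if_neg (by simp [hc]), PySem.Dict.getD_of_not_contains c 0 hc, Int.zero_add]
  have hperm : (pvRle t).Perm
      ((PySem.Set.ofList labels).map (fun k => (k, (labels.count k : Int)))) := by
    rw [h1]
    have hsetperm : (PySem.Set.ofList t).Perm (PySem.Set.ofList labels) :=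
      (List.perm_ext_iff_of_nodup (PySem.Set.nodup_ofList t) (PySem.Set.nodup_ofList labels)).mpr
        (fun a => by rw [PySem.Set.mem_ofList, PySem.Set.mem_ofList, hperm_t.mem_iff])
    have : (PySem.Set.ofList t).map (fun k => (k, (t.count k : Int)))
        = (PySem.Set.ofList t).map (fun k => (k, (labels.count k : Int))) :=
      List.map_congr_left fun k _ => by rw [hperm_t.count_eq]
    rw [this]
    exact hsetperm.map _
  have hpair : List.Pairwise (fun a b : Int × Int => a.1 < b.1) (pvRle t) := by
    rw [h1]
    exact List.Pairwise.map _ (fun a b h => h) h2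
  rw [hcount, PySem.Dict.items_counter,
    PySem.List.sorted_eq_of_perm_of_pairwise_lt _ _ _ hperm hpair]
  have hkeys : ((pvRle t).map Prod.fst).Nodup := by
    rw [h1, List.map_map]
    simp [Function.comp_def]
  have := PySem.Dict.items_foldl_insert_fresh (pvRle t) Prod.fst Prod.snd PySem.Dict.empty
    (fun a _ => by simp [PySem.Dict.contains_empty]) hkeys
  simpa [PySem.Dict.ofList, PySem.Dict.update] using this

-- ===== VERDICT (by name: the statement is the Claim_ definition above) =====
theorem record_net_data_stats_spec : Claim_equal_record_net_data_stats := by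
  intro y m _ _
  unfold Spec_record_net_data_stats record_net_data_stats record_net_data_stats_alt
  congr 1
  apply PySem.List.foldl_congr_mem
  intro acc p _
  rw [pv_inner_eq]
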